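-- pv_equiv track=rewrite | github.com/tainguyenvl/Intermediate-Software-Engineering-Summer-2022- | findKfrequency.py | findKfrequency
-- ===== SOURCE A (Python) =====
-- def findKfrequency(nums, n):
--   dic = {}
--   arr = []
--   for i in range(len(nums)):
--     if nums[i] in dic:
--       dic[nums[i]] +=1
--     else:
--       dic[nums[i]] = 1
--
--   for k,v in dic.items():
--     if v == n:
--       arr.append(k)
--   return arr
-- ===== SOURCE B (Python) =====
-- def findKfrequency(nums, n):
--   arr = []
--   seen = set()
--   for x in nums:
--     if x not in seen:
--       seen.add(x)
--       if nums.count(x) == n: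
--         arr.append(x)
--   return arr
-- ===== Notes on version B (the rewrite author's own statement) =====
-- stated objective: alternative
-- what changed: Drops A's frequency dict and its second pass over the items: a single loop keeps only first occurrences via a seen-set and gets each distinct element's frequency by rescanning with nums.count.
import Mathlib
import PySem

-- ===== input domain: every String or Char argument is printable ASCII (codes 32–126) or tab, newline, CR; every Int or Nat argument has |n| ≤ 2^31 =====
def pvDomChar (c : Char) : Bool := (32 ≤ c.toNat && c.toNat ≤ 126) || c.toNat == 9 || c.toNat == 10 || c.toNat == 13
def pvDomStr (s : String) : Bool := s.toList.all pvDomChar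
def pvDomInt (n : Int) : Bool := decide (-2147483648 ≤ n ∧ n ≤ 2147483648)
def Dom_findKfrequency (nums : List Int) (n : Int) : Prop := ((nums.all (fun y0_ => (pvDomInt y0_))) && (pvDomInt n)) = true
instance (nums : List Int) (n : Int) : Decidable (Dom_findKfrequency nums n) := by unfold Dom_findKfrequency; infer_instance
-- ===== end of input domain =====

-- B replaces A's frequency dict + second pass over its items by a single loop that keeps only
-- first occurrences (a seen-set) and rescans with nums.count; alternative decomposition, not claimed faster.

-- ===== PORT A =====
def findKfrequency (nums : List Int) (n : Int) : List Int :=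
  let dic : PySem.Dict Int Int :=
    (PySem.List.pyRange 0 (PySem.List.len nums) 1).foldl
      (fun dic i =>
        if dic.contains (PySem.List.pyGetD nums i 0) then
          dic.insert (PySem.List.pyGetD nums i 0) (dic.getD (PySem.List.pyGetD nums i 0) 0 + 1)
        else
          dic.insert (PySem.List.pyGetD nums i 0) 1)
      PySem.Dict.empty
  dic.items.foldl (fun arr p => if p.2 == n then arr ++ [p.1] else arr) []

-- ===== PORT B =====
def findKfrequency_alt (nums : List Int) (n : Int) : List Int :=
  (nums.foldl
    (fun (s : List Int × PySem.Set Int) x =>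
      if !(PySem.Set.contains s.2 x) then
        (if (PySem.List.count nums x : Int) == n then s.1 ++ [x] else s.1, PySem.Set.add s.2 x)
      else s)
    ([], PySem.Set.empty)).1

-- ===== PRECONDITION & SPEC =====
def Spec_findKfrequency (nums : List Int) (n : Int) (out : List Int) : Prop := out = findKfrequency_alt nums n
instance (nums : List Int) (n : Int) (out : List Int) : Decidable (Spec_findKfrequency nums n out) := by unfold Spec_findKfrequency; infer_instance

-- ===== CLAIM (what is proved, stated in full; the proofs are below) =====
def Claim_equal_findKfrequency : Prop := ∀ (nums : List Int) (n : Int), Dom_findKfrequency nums n → Spec_findKfrequency nums n (findKfrequency nums n)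

-- ===== LEMMAS AND PROOFS =====

lemma contains_ofList (xs : List Int) (y : Int) :
    (PySem.Set.ofList xs).contains y = xs.contains y := by
  simp [PySem.Set.mem_ofList]

lemma ofList_append_singleton (xs : List Int) (y : Int) :
    PySem.Set.ofList (xs ++ [y])
      = if xs.contains y then PySem.Set.ofList xs else PySem.Set.ofList xs ++ [y] := by
  rw [← contains_ofList]
  simp [PySem.Set.ofList_eq_foldl, List.foldl_append, PySem.Set.add]

lemma alt_loop_inv (nums : List Int) (n : Int) (xs : List Int) :
    xs.foldl
      (fun (s : List Int × PySem.Set Int) x =>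
        if !(PySem.Set.contains s.2 x) then
          (if (PySem.List.count nums x : Int) == n then s.1 ++ [x] else s.1, PySem.Set.add s.2 x)
        else s)
      ([], PySem.Set.empty)
    = ((PySem.Set.ofList xs).filter (fun k => ((List.count k nums : Int) == n)),
       PySem.Set.ofList xs) := by
  induction xs using List.reverseRecOn with
  | nil => rfl
  | append_singleton xs y ih =>
    rw [List.foldl_append, ih, ofList_append_singleton]
    simp only [List.foldl_cons, List.foldl_nil]
    by_cases hym : y ∈ xs
    · simp [hym]
    · simp [hym, List.filter_append, List.filter_singleton]
      split_ifs with h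
      · simp [h]
      · have hb : ((List.count y nums : Int) == n) = false := by simpa using h
        rw [hb]
        simp

-- A in normal form: the distinct elements in first-occurrence order whose count equals n.
lemma findKfrequency_eq_filter (nums : List Int) (n : Int) :
    findKfrequency nums n
      = (PySem.Set.ofList nums).filter (fun k => ((List.count k nums : Int) == n)) := by
  show ((PySem.List.pyRange 0 (PySem.List.len nums) 1).foldl
        (fun dic i =>
          if dic.contains (PySem.List.pyGetD nums i 0) then
            dic.insert (PySem.List.pyGetD nums i 0) (dic.getD (PySem.List.pyGetD nums i 0) 0 + 1)
          else
            dic.insert (PySem.List.pyGetD nums i 0) 1)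
        PySem.Dict.empty).items.foldl (fun arr p => if p.2 == n then arr ++ [p.1] else arr) [] = _
  have h1 : (PySem.List.pyRange 0 (PySem.List.len nums) 1).foldl
        (fun dic i =>
          if dic.contains (PySem.List.pyGetD nums i 0) then
            dic.insert (PySem.List.pyGetD nums i 0) (dic.getD (PySem.List.pyGetD nums i 0) 0 + 1)
          else
            dic.insert (PySem.List.pyGetD nums i 0) 1)
        PySem.Dict.empty
      = PySem.Dict.counter nums := by
    have h2 := PySem.List.foldl_pyRange_zero_pyGetD nums 0
      (fun (dic : PySem.Dict Int Int) x =>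
        if dic.contains x then dic.insert x (dic.getD x 0 + 1) else dic.insert x 1)
      PySem.Dict.empty
    refine h2.trans ?_
    have hstep : (fun (dic : PySem.Dict Int Int) (x : Int) =>
        if dic.contains x then dic.insert x (dic.getD x 0 + 1) else dic.insert x 1)
        = fun dic x => dic.insert x (dic.getD x 0 + 1) := by
      funext dic x
      by_cases h : dic.contains x = true
      · simp [h]
      · simp only [Bool.not_eq_true] at h
        simp [h, PySem.Dict.getD_of_not_contains dic 0 h]
    rw [hstep, PySem.Dict.foldl_insert_getD_add_one_eq_counter]
  rw [h1]
  rw [PySem.List.foldl_append_if (fun p : Int × Int => p.2 == n) (fun p => p.1)]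
  rw [PySem.Dict.items_counter]
  rw [List.filter_map]
  simp only [List.nil_append, List.map_map]
  rw [show ((fun p : Int × Int => p.1) ∘ fun k : Int => (k, (List.count k nums : Int))) = id from rfl, List.map_id]
  exact List.filter_congr (fun x _ => rfl)

-- B in the same normal form.
lemma findKfrequency_alt_eq_filter (nums : List Int) (n : Int) :
    findKfrequency_alt nums n
      = (PySem.Set.ofList nums).filter (fun k => ((List.count k nums : Int) == n)) := by
  show (nums.foldl
      (fun (s : List Int × PySem.Set Int) x =>
        if !(PySem.Set.contains s.2 x) then
          (if (PySem.List.count nums x : Int) == n then s.1 ++ [x] else s.1, PySem.Set.add s.2 x)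
        else s)
      ([], PySem.Set.empty)).1 = _
  rw [alt_loop_inv]

-- ===== VERDICT (by name: the statement is the Claim_ definition above) =====
theorem findKfrequency_spec : Claim_equal_findKfrequency := by
  intro nums n _
  unfold Spec_findKfrequency
  rw [findKfrequency_eq_filter, findKfrequency_alt_eq_filter]
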